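-- pv_equiv track=rewrite | github.com/YariksBBshka/bot | utilities.py | matrix_sorting
-- ===== SOURCE A (Python) =====
-- def matrix_sorting(matr,sort_type=0,):#sort_type: 0 - времени, 1 - знаку (типу), 2 - по валюте, 3 - сумме, 4 - категории
-- 		for i in range(len(matr)):
-- 			key = matr[i].pop(sort_type)
-- 			matr[i].insert(0, key)
-- 		matr = sorted(matr)
-- 		for i in range(len(matr)):
-- 			key = matr[i].pop(0)
-- 			matr[i].insert(sort_type, key)
-- 		return matr
-- ===== SOURCE B (Python) =====
-- # One-shot sorted() with a key that puts the chosen column first; no row surgery needed.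
-- # Note: A temporarily mutates the row lists but restores them before returning, so for
-- # in-range non-negative sort_type there is no observable net mutation; B mutates nothing.
-- def matrix_sorting(matr, sort_type=0):
--     return sorted(matr, key=lambda r: [r[sort_type]] + r[:sort_type] + r[sort_type + 1:])
-- ===== Notes on version B (the rewrite author's own statement) =====
-- stated objective: simpler
-- what changed: The three-part procedure (move chosen column to front of every row, sort, move it back) is replaced by a single sorted() call whose key is the row with the chosen column rotated to the front, so no rows are rearranged or mutated.
-- outside the precondition, e.g. on matrix_sorting([['a', 'b']], -1): A returns [['b', 'a']], B returns [['a', 'b']]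
import Mathlib
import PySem

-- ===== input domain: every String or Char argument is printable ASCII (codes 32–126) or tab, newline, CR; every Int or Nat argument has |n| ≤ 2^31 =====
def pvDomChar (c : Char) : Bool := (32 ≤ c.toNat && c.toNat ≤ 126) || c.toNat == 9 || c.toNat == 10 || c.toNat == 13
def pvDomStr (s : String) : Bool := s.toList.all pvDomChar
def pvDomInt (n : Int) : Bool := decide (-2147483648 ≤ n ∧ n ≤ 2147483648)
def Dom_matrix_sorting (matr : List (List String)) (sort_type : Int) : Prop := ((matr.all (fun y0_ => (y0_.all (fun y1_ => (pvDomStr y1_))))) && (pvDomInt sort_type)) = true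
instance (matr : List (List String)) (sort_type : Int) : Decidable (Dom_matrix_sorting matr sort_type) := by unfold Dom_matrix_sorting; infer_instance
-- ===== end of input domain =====

-- B replaces A's move-column/sort/move-back procedure by one key-based sorted() call (objective: simpler).
-- Equivalence is about the RETURN value; A temporarily mutates the row lists but restores them before
-- returning, so on Pre_ there is no observable net side effect either.

-- ===== PORT A =====
-- 'key = matr[i].pop(sort_type); matr[i].insert(0, key)'
def pvMoveRow (row : List String) (sort_type : Int) : List String :=
  match PySem.List.pop? row sort_type with
  | some (k, rest) => PySem.List.insert rest 0 k
  | none => row          -- Python raises IndexError here; excluded by Pre_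

-- 'key = matr[i].pop(0); matr[i].insert(sort_type, key)'
def pvRestoreRow (row : List String) (sort_type : Int) : List String :=
  match PySem.List.pop? row 0 with
  | some (k, rest) => PySem.List.insert rest sort_type k
  | none => row          -- Python raises IndexError here; excluded by Pre_

def matrix_sorting (matr : List (List String)) (sort_type : Int) : List (List String) :=
  -- first loop, then sorted(matr) (lexicographic list-of-strings order), then the restore loop
  (PySem.List.sorted (matr.map (fun row => pvMoveRow row sort_type)) (fun r => r) false).map
    (fun row => pvRestoreRow row sort_type)

-- ===== PORT B =====
-- lambda r: [r[sort_type]] + r[:sort_type] + r[sort_type+1:]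
def pvKeyRow (row : List String) (sort_type : Int) : List String :=
  (match PySem.List.pyGet? row sort_type with
   | some v => [v]
   | none => []) ++       -- Python raises IndexError here; excluded by Pre_
  PySem.List.slice row none (some sort_type) ++
  PySem.List.slice row (some (sort_type + 1)) none

def matrix_sorting_alt (matr : List (List String)) (sort_type : Int) : List (List String) :=
  PySem.List.sorted matr (fun r => pvKeyRow r sort_type) false

-- ===== PRECONDITION & SPEC =====
-- Pre_ restricts to the function's natural domain of non-negative column indices in range for every row
-- (the source comment enumerates columns 0-4): outside it A either raises IndexError (index out of range
-- for some row) or, for a negative in-range index, A's pop/insert wraparound and B's slice key are both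
-- accidental conventions on an unspecified corner and disagree.
def Pre_matrix_sorting (matr : List (List String)) (sort_type : Int) : Prop :=
  ∀ row ∈ matr, 0 ≤ sort_type ∧ sort_type < (row.length : Int)
instance (matr : List (List String)) (sort_type : Int) : Decidable (Pre_matrix_sorting matr sort_type) := by unfold Pre_matrix_sorting; infer_instance

def pvWitness_matrix_sorting : List (List String) × Int := ([["b", "x"], ["a", "y"]], 1)

def Spec_matrix_sorting (matr : List (List String)) (sort_type : Int) (out : List (List String)) : Prop := out = matrix_sorting_alt matr sort_type
instance (matr : List (List String)) (sort_type : Int) (out : List (List String)) : Decidable (Spec_matrix_sorting matr sort_type out) := by unfold Spec_matrix_sorting; infer_instance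

-- ===== CLAIM (what is proved, stated in full; the proofs are below) =====
def Claim_equal_matrix_sorting : Prop := ∀ (matr : List (List String)) (sort_type : Int), Dom_matrix_sorting matr sort_type → Pre_matrix_sorting matr sort_type → Spec_matrix_sorting matr sort_type (matrix_sorting matr sort_type)

-- ===== LEMMAS AND PROOFS =====

-- Moving the chosen column to the front of a row is exactly B's sort key.
theorem pvMoveRow_eq_key (row : List String) (n : Nat) (h : n < row.length) :
    pvMoveRow row (n : Int) = pvKeyRow row (n : Int) := by
  unfold pvMoveRow pvKeyRow
  rw [PySem.List.pop?_natCast row n h, PySem.List.pyGet?_natCast]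
  simp [PySem.List.insert_zero, PySem.List.slice_to_natCast, h,
    List.eraseIdx_eq_take_drop_succ]
  rw [show ((n : Int) + 1) = ((n + 1 : Nat) : Int) by push_cast; ring,
    PySem.List.slice_from_natCast]

-- Restoring undoes the move: pop(0) then insert(sort_type, .) on the key row gives the row back.
theorem pvRestore_key (row : List String) (n : Nat) (h : n < row.length) :
    pvRestoreRow (pvKeyRow row (n : Int)) (n : Int) = row := by
  unfold pvKeyRow pvRestoreRow
  rw [PySem.List.pyGet?_natCast, List.getElem?_eq_getElem h]
  simp only [List.cons_append, PySem.List.slice_to_natCast]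
  rw [PySem.List.pop?_zero_cons]
  dsimp only
  simp only [List.nil_append]
  rw [show ((n : Int) + 1) = ((n + 1 : Nat) : Int) by push_cast; ring,
    PySem.List.slice_from_natCast,
    PySem.List.insert_natCast _ n _ (by simp [List.length_take]; omega)]
  rw [List.take_append_of_le_length (by simp; omega),
    List.drop_append_of_le_length (by simp; omega)]
  simp [List.take_take]

-- Decidable instances are irrelevant to the value of sorted.
theorem sorted_decEq {α κ : Type} [LT κ] (d1 d2 : DecidableLT κ) (xs : List α) (key : α → κ) (rev : Bool) :
    @PySem.List.sorted α κ _ d1 xs key rev = @PySem.List.sorted α κ _ d2 xs key rev := by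
  congr 1

-- sorted(map f xs) (by the list itself) = map f (sorted xs by key f): both are ≤-sorted permutations of the same list.
theorem sorted_map_eq_map_sorted (xs : List (List String)) (f : List String → List String) :
    PySem.List.sorted (xs.map f) (fun r => r) false
      = (PySem.List.sorted xs f false).map f := by
  rw [@sorted_decEq (List String) (List String) List.instLT _ (@LinearOrder.toDecidableLT _ List.instLinearOrder) (xs.map f) (fun r => r) false,
      @sorted_decEq (List String) (List String) List.instLT _ (@LinearOrder.toDecidableLT _ List.instLinearOrder) xs f false]
  apply PySem.List.eq_of_perm_of_pairwise_le_of_injective (fun r => r) (fun _ _ h => h)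
  · exact (@PySem.List.sorted_perm _ _ List.instLT (@LinearOrder.toDecidableLT _ List.instLinearOrder) (xs.map f) (fun r => r) false).trans
      ((@PySem.List.sorted_perm _ _ List.instLT (@LinearOrder.toDecidableLT _ List.instLinearOrder) xs f false).map f).symm
  · exact PySem.List.sorted_pairwise _ _
  · exact List.pairwise_map.mpr (PySem.List.sorted_pairwise xs f)

-- ===== VERDICT (by name: the statement is the Claim_ definition above) =====
theorem matrix_sorting_spec : Claim_equal_matrix_sorting := by
  intro matr sort_type _ hpre
  unfold Spec_matrix_sorting matrix_sorting matrix_sorting_alt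
  have hmove : matr.map (fun row => pvMoveRow row sort_type)
      = matr.map (fun row => pvKeyRow row sort_type) := by
    apply List.map_congr_left
    intro row hrow
    obtain ⟨h0, hlt⟩ := hpre row hrow
    obtain ⟨n, rfl⟩ := Int.eq_ofNat_of_zero_le h0
    exact pvMoveRow_eq_key row n (by exact_mod_cast hlt)
  rw [hmove, sorted_map_eq_map_sorted, List.map_map]
  have hres : ∀ row ∈ PySem.List.sorted matr (fun row => pvKeyRow row sort_type) false,
      ((fun row => pvRestoreRow row sort_type) ∘ fun row => pvKeyRow row sort_type) row = id row := by
    intro row hrow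
    have hrow' : row ∈ matr := (PySem.List.mem_sorted _ _ _ _).mp hrow
    obtain ⟨h0, hlt⟩ := hpre row hrow'
    obtain ⟨n, rfl⟩ := Int.eq_ofNat_of_zero_le h0
    exact pvRestore_key row n (by exact_mod_cast hlt)
  rw [List.map_congr_left hres, List.map_id]
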